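-- pv_equiv track=rewrite | github.com/arianahejazyan/chess-engine | Nyx/utils/bit_tools.py | mask_rook_attacks
-- ===== SOURCE A (Python) =====
-- def mask_rook_attacks(square: int) -> int:
--     """
--     Generates a bitboard representing the possible rook attacks from a given square on a chess board.
--     """
--
--     mask = 0
--
--     r = square // 14 # rank
--     f = square % 14  # file
--
--     for d in range(1, 13 - r): mask ^= (1 << square + d * 14) # Up-Direction
--     for d in range(1,      r): mask ^= (1 << square - d * 14) # Down-Direction
--     for d in range(1, 13 - f): mask ^= (1 << square + d     ) # Right-Direction
--     for d in range(1,      f): mask ^= (1 << square - d     ) # Left-Direction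
--
--     return mask
-- ===== SOURCE B (Python) =====
-- def mask_rook_attacks(square: int) -> int:
--     """
--     Generates a bitboard representing the possible rook attacks from a given square on a chess board.
--     """
--     r, f = divmod(square, 14)
--
--     def column(bits: int) -> int:
--         # a run of `bits` set bits spaced 14 apart (one per rank)
--         return ((1 << 14 * bits) - 1) // ((1 << 14) - 1)
--
--     up    = column(max(0, 12 - r)) << square + 14
--     down  = column(max(0, r - 1)) << f + 14
--     right = ((1 << max(0, 12 - f)) - 1) << square + 1
--     left  = ((1 << max(0, f - 1)) - 1) << 14 * r + 1
--     return up + down + right + left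
-- ===== Notes on version B (the rewrite author's own statement) =====
-- stated objective: simpler
-- what changed: Replaces A's four per-direction xor-accumulation loops (O(square/14) iterations of big-int shifts) with closed-form geometric bit runs: each direction's attacks are a single shifted run (contiguous bits or a 14-spaced repunit quotient), summed; Pre_ excludes only negative squares, on which A raises ValueError (negative shift).
import Mathlib
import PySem

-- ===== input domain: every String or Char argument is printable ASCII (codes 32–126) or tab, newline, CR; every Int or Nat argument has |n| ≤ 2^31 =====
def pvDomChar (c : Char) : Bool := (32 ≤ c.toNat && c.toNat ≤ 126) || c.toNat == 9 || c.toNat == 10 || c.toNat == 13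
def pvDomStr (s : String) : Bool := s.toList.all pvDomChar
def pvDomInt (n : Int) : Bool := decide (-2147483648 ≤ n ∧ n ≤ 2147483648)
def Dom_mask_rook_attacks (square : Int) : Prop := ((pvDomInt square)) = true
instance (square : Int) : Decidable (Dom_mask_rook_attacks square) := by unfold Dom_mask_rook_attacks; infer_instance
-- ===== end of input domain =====

-- B replaces A's four per-direction xor loops by closed-form geometric bit runs (one shift per direction); objective: simpler.

-- ===== PORT A =====
-- Python '1 << e'; exact for nonnegative e (Pre_ guarantees every shift amount is nonnegative; Python raises ValueError on a negative shift)
def pyShl1 (e : Int) : Int := 1 <<< e.toNat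

def mask_rook_attacks (square : Int) : Int :=
  let r := PySem.Int.floordiv square 14
  let f := PySem.Int.mod square 14
  let mask : Int := 0
  let mask := (PySem.List.pyRange 1 (13 - r) 1).foldl (fun m d => PySem.Int.bxor m (pyShl1 (square + d * 14))) mask
  let mask := (PySem.List.pyRange 1 r 1).foldl (fun m d => PySem.Int.bxor m (pyShl1 (square - d * 14))) mask
  let mask := (PySem.List.pyRange 1 (13 - f) 1).foldl (fun m d => PySem.Int.bxor m (pyShl1 (square + d))) mask
  let mask := (PySem.List.pyRange 1 f 1).foldl (fun m d => PySem.Int.bxor m (pyShl1 (square - d))) mask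
  mask

-- ===== PORT B =====
-- Python 'x << e' for nonnegative x; exact for nonnegative e (all of B's shift amounts are nonnegative on Pre_)
def pyShl (x e : Int) : Int := x <<< e.toNat

-- Source B's helper 'column': a run of `bits` set bits spaced 14 apart (one per rank)
def column (bits : Int) : Int :=
  PySem.Int.floordiv (pyShl 1 (14 * bits) - 1) (pyShl 1 14 - 1)

def mask_rook_attacks_alt (square : Int) : Int :=
  let r := PySem.Int.floordiv square 14
  let f := PySem.Int.mod square 14
  let up    := pyShl (column (max 0 (12 - r))) (square + 14)
  let down  := pyShl (column (max 0 (r - 1))) (f + 14)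
  let right := pyShl (pyShl 1 (max 0 (12 - f)) - 1) (square + 1)
  let left  := pyShl (pyShl 1 (max 0 (f - 1)) - 1) (14 * r + 1)
  up + down + right + left

-- ===== PRECONDITION & SPEC =====
-- Pre_: Python A raises ValueError ('negative shift count') on every negative square, so exactly the nonnegative squares are admitted.
def Pre_mask_rook_attacks (square : Int) : Prop := 0 ≤ square
instance (square : Int) : Decidable (Pre_mask_rook_attacks square) := by unfold Pre_mask_rook_attacks; infer_instance
def pvWitness_mask_rook_attacks : Int := 17

def Spec_mask_rook_attacks (square : Int) (out : Int) : Prop := out = mask_rook_attacks_alt square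
instance (square : Int) (out : Int) : Decidable (Spec_mask_rook_attacks square out) := by unfold Spec_mask_rook_attacks; infer_instance

-- ===== CLAIM (what is proved, stated in full; the proofs are below) =====
def Claim_equal_mask_rook_attacks : Prop := ∀ (square : Int), Dom_mask_rook_attacks square → Pre_mask_rook_attacks square → Spec_mask_rook_attacks square (mask_rook_attacks square)

-- ===== LEMMAS AND PROOFS =====

-- xor with a fresh power of two is addition
theorem xor_two_pow_add (p : Nat) : ∀ m : Nat, m.testBit p = false → m ^^^ 2^p = m + 2^p := by
  induction p with
  | zero =>
    intro m h
    have : Even m := by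
      simp [Nat.testBit_zero] at h
      exact Nat.even_iff.mpr (by omega)
    simpa using Nat.xor_one_of_even this
  | succ p ih =>
    intro m h
    have h2 : (m/2).testBit p = false := by
      rw [← Nat.testBit_add_one]; exact h
    have ihm := ih (m/2) h2
    have e1 : (m ^^^ 2^(p+1)) % 2 = (m + 2^(p+1)) % 2 := Nat.xor_mod_two_eq
    have e2 : (m ^^^ 2^(p+1)) / 2 = m/2 ^^^ 2^p := by
      rw [Nat.xor_div_two]; congr 1; omega
    have e3 : m ^^^ 2^(p+1) = 2 * ((m ^^^ 2^(p+1))/2) + (m ^^^ 2^(p+1)) % 2 := by omega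
    have hp : 2^(p+1) = 2*2^p := by ring
    rw [e3, e2, ihm, e1]
    omega

-- folding xor over pairwise-distinct exponents, starting from an accumulator with those bits clear, is summation
theorem fold_xor_sum (L : List Nat) : ∀ acc : Nat, L.Nodup → (∀ p ∈ L, acc.testBit p = false) →
    L.foldl (fun m p => m ^^^ 2^p) acc = acc + (L.map (2 ^ ·)).sum := by
  induction L with
  | nil => intro acc _ _; simp
  | cons p L ih =>
    intro acc hnd hbits
    have hp : acc.testBit p = false := hbits p (by simp)
    have hstep : acc ^^^ 2^p = acc + 2^p := xor_two_pow_add p acc hp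
    have hbits' : ∀ q ∈ L, (acc + 2^p).testBit q = false := by
      intro q hq
      have hqp : q ≠ p := by
        intro h; exact (List.nodup_cons.mp hnd).1 (h ▸ hq)
      rw [← hstep, Nat.testBit_xor, hbits q (by simp [hq]),
        Nat.testBit_two_pow_of_ne (fun h => hqp h.symm)]
      rfl
    simp only [List.foldl_cons, hstep, ih (acc + 2^p) (List.nodup_cons.mp hnd).2 hbits',
      List.map_cons, List.sum_cons]
    ring

-- cast a fold over naturals out of Int
theorem foldl_natCast {l : List Nat} (F : Int → Nat → Int) (G : Nat → Nat → Nat) :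
    ∀ acc : Nat, (∀ (m k : Nat), k ∈ l → F (↑m) k = ↑(G m k)) →
    l.foldl F (↑acc) = ↑(l.foldl G acc) := by
  induction l with
  | nil => intro acc _; simp
  | cons k l ih =>
    intro acc h
    simp only [List.foldl_cons, h acc k (by simp)]
    exact ih (G acc k) (fun m k' hk' => h m k' (by simp [hk']))

theorem shl1_cast (k : Nat) : ((1 : Int) <<< k) = ((2^k : Nat) : Int) := by
  have : ((1:Nat) : Int) <<< k = ((1 <<< k : Nat) : Int) := Int.mem_toNat?.mp rfl
  simpa [Nat.shiftLeft_eq] using this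

theorem shl_cast (m k : Nat) : ((m : Int) <<< k) = ((m <<< k : Nat) : Int) := Int.mem_toNat?.mp rfl

theorem pyShl1_natCast (a : Nat) : pyShl1 ((a : Nat) : Int) = ((2^a : Nat) : Int) := by
  simp only [pyShl1, Int.toNat_natCast]
  exact shl1_cast a

theorem pyShl_natCast (x e : Nat) : pyShl (x : Int) (e : Int) = ((x * 2^e : Nat) : Int) := by
  simp only [pyShl, Int.toNat_natCast, shl_cast, Nat.shiftLeft_eq]

-- one of A's directional loops, cast down to a fold over naturals
theorem loop_conv (b : Int) (N : Nat) (hb : (b - 1).toNat = N) (E : Int → Int) (e : Nat → Nat)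
    (hE : ∀ k : Nat, k < N → E (1 + (k:Int)) = ((e k : Nat) : Int)) (acc : Nat) :
    (PySem.List.pyRange 1 b 1).foldl (fun m d => PySem.Int.bxor m (pyShl1 (E d))) (↑acc)
    = ↑(((List.range N).map e).foldl (fun m p => m ^^^ 2^p) acc) := by
  rw [PySem.List.pyRange_one, hb, List.foldl_map, List.foldl_map]
  apply foldl_natCast
  intro m k hk
  rw [hE k (List.mem_range.mp hk), pyShl1_natCast, PySem.Int.bxor_natCast]

theorem list_sum_range (N : Nat) (g : Nat → Nat) :
    ((List.range N).map g).sum = ∑ k ∈ Finset.range N, g k := rfl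

-- A's mask, as a sum of distinct powers of two
theorem A_eval (n : Nat) :
    mask_rook_attacks (n : Int)
    = (((∑ k ∈ Finset.range (12 - n/14), 2^(n + 14*(k+1)))
      + (∑ k ∈ Finset.range (n/14 - 1), 2^(14*(n/14 - 1 - k) + n % 14))
      + (∑ k ∈ Finset.range (12 - n % 14), 2^(n + (k+1)))
      + (∑ k ∈ Finset.range (n % 14 - 1), 2^(14*(n/14) + (n % 14 - 1 - k))) : Nat) : Int) := by
  have hF : n % 14 < 14 := Nat.mod_lt n (by norm_num)
  have hn : n = 14 * (n/14) + n % 14 := (Nat.div_add_mod' n 14).symm ▸ by omega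
  have hr : PySem.Int.floordiv (n : Int) 14 = ((n/14 : Nat) : Int) := by
    exact_mod_cast PySem.Int.floordiv_natCast n 14
  have hf : PySem.Int.mod (n : Int) 14 = ((n % 14 : Nat) : Int) := by
    exact_mod_cast PySem.Int.mod_natCast n 14
  have h0 : ((0:Int)) = ((0:Nat) : Int) := rfl
  simp only [mask_rook_attacks, hr, hf, h0]
  rw [loop_conv (13 - ((n/14 : Nat) : Int)) (12 - n/14) (by omega)
      (fun d => (n:Int) + d * 14) (fun k => n + 14*(k+1)) (by intro k _; push_cast; ring) 0]
  rw [loop_conv ((n/14 : Nat) : Int) (n/14 - 1) (by omega)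
      (fun d => (n:Int) - d * 14) (fun k => 14*(n/14 - 1 - k) + n % 14)
      (by intro k hk; push_cast; omega) _]
  rw [loop_conv (13 - ((n % 14 : Nat) : Int)) (12 - n % 14) (by omega)
      (fun d => (n:Int) + d) (fun k => n + (k+1)) (by intro k _; push_cast; ring) _]
  rw [loop_conv ((n % 14 : Nat) : Int) (n % 14 - 1) (by omega)
      (fun d => (n:Int) - d) (fun k => 14*(n/14) + (n % 14 - 1 - k))
      (by intro k hk; push_cast; omega) _]
  have hnodup : ((List.range (12 - n/14)).map (fun k => n + 14*(k+1))
      ++ ((List.range (n/14 - 1)).map (fun k => 14*(n/14 - 1 - k) + n % 14)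
      ++ ((List.range (12 - n % 14)).map (fun k => n + (k+1))
      ++ (List.range (n % 14 - 1)).map (fun k => 14*(n/14) + (n % 14 - 1 - k))))).Nodup := by
    have inj : ∀ (e : Nat → Nat) (N : Nat), (∀ x y, x < y → y < N → e y ≠ e x) →
        ((List.range N).map e).Nodup := by
      intro e N he
      refine (List.nodup_map_iff_inj_on List.nodup_range).mpr ?_
      intro x hx y hy hxy
      rw [List.mem_range] at hx hy
      rcases Nat.lt_trichotomy x y with h | h | h
      · exact absurd hxy.symm (he x y h hy)
      · exact h
      · exact absurd hxy (he y x h hx)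
    have n1 := inj (fun k => n + 14*(k+1)) (12 - n/14) (by intro x y h hy; simp; omega)
    have n2 := inj (fun k => 14*(n/14 - 1 - k) + n % 14) (n/14 - 1) (by intro x y h hy; simp; omega)
    have n3 := inj (fun k => n + (k+1)) (12 - n % 14) (by intro x y h hy; simp; omega)
    have n4 := inj (fun k => 14*(n/14) + (n % 14 - 1 - k)) (n % 14 - 1) (by intro x y h hy; simp; omega)
    have dis : ∀ (e e' : Nat → Nat) (N N' : Nat),
        (∀ x y, x < N → y < N' → e x ≠ e' y) →
        ((List.range N).map e).Disjoint ((List.range N').map e') := by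
      intro e e' N N' h a ha hb
      simp only [List.mem_map, List.mem_range] at ha hb
      obtain ⟨x, hx, hxe⟩ := ha
      obtain ⟨y, hy, hye⟩ := hb
      exact h x y hx hy (hxe.trans hye.symm)
    refine List.Nodup.append n1 (List.Nodup.append n2 (List.Nodup.append n3 n4 ?_) ?_) ?_
    · exact dis _ _ _ _ (by intro x y hx hy; simp; omega)
    · rw [List.disjoint_append_right]
      exact ⟨dis _ _ _ _ (by intro x y hx hy; simp; omega),
             dis _ _ _ _ (by intro x y hx hy; simp; omega)⟩
    · rw [List.disjoint_append_right, List.disjoint_append_right]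
      exact ⟨dis _ _ _ _ (by intro x y hx hy; simp; omega),
             dis _ _ _ _ (by intro x y hx hy; simp; omega),
             dis _ _ _ _ (by intro x y hx hy; simp; omega)⟩
  rw [← List.foldl_append, ← List.foldl_append, ← List.foldl_append,
    fold_xor_sum _ 0 hnodup (fun p _ => Nat.zero_testBit p)]
  simp only [List.map_append, List.sum_append, List.map_map, Function.comp, list_sum_range]
  push_cast
  ring

-- geometric run: sum of M consecutive powers of x
theorem geom_aux (x : Nat) (hx : 1 ≤ x) : ∀ M : Nat, (∑ k ∈ Finset.range M, x^k) * (x - 1) + 1 = x^M := by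
  intro M
  induction M with
  | zero => simp
  | succ M ih =>
    rw [Finset.sum_range_succ, Nat.add_mul, pow_succ]
    have hxm : 1 ≤ x ^ M := Nat.one_le_pow _ _ (by omega)
    zify [hx] at ih ⊢
    linear_combination ih

-- the repunit quotient behind 'column': M bits spaced 14 apart
theorem column_sum (M : Nat) : (2^(14*M) - 1) / (2^14 - 1) = ∑ k ∈ Finset.range M, 2^(14*k) := by
  have h2 := geom_aux (2^14) (by norm_num) M
  rw [← pow_mul] at h2
  have hs : (∑ k ∈ Finset.range M, (2^14)^k) = ∑ k ∈ Finset.range M, 2^(14*k) :=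
    Finset.sum_congr rfl (fun k _ => by rw [pow_mul])
  rw [hs] at h2
  have he : 2^(14*M) - 1 = (∑ k ∈ Finset.range M, 2^(14*k)) * (2^14 - 1) := by omega
  rw [he, Nat.mul_div_cancel _ (by norm_num)]

theorem pow_run (M : Nat) : (∑ k ∈ Finset.range M, 2^k) = 2^M - 1 := by
  have h := geom_aux 2 (by norm_num) M
  omega

-- 'column ↑M' evaluated over the naturals
theorem column_natCast (M : Nat) :
    column ((M : Nat) : Int) = ((∑ k ∈ Finset.range M, 2^(14*k) : Nat) : Int) := by
  have e14 : (14 : Int) * ((M : Nat) : Int) = ((14 * M : Nat) : Int) := by push_cast; ring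
  have p1 : pyShl 1 ((14 * M : Nat) : Int) = ((2^(14*M) : Nat) : Int) := by
    rw [show (1:Int) = ((1:Nat) : Int) from rfl, pyShl_natCast]; norm_num
  have p2 : pyShl 1 14 = ((2^14 : Nat) : Int) := rfl
  have m1 : ((2^(14*M) : Nat) : Int) - 1 = ((2^(14*M) - 1 : Nat) : Int) := by
    have : 1 ≤ (2^(14*M) : Nat) := Nat.one_le_two_pow
    push_cast [this]; ring
  have m2 : ((2^14 : Nat) : Int) - 1 = ((2^14 - 1 : Nat) : Int) := by norm_num
  have hdiv : PySem.Int.floordiv ((2^(14*M) - 1 : Nat) : Int) ((2^14 - 1 : Nat) : Int)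
      = (((2^(14*M) - 1) / (2^14 - 1) : Nat) : Int) := by
    exact_mod_cast PySem.Int.floordiv_natCast _ _
  rw [column, e14, p1, p2, m1, m2, hdiv, column_sum]

-- B's mask, with every shift and division carried out over ℕ
theorem B_eval (n : Nat) :
    mask_rook_attacks_alt (n : Int)
    = (((∑ k ∈ Finset.range (12 - n/14), 2^(14*k)) * 2^(n+14)
      + (∑ k ∈ Finset.range (n/14 - 1), 2^(14*k)) * 2^(n % 14 + 14)
      + (2^(12 - n % 14) - 1) * 2^(n+1)
      + (2^(n % 14 - 1) - 1) * 2^(14*(n/14)+1) : Nat) : Int) := by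
  have hr : PySem.Int.floordiv (n : Int) 14 = ((n/14 : Nat) : Int) := by
    exact_mod_cast PySem.Int.floordiv_natCast n 14
  have hf : PySem.Int.mod (n : Int) 14 = ((n % 14 : Nat) : Int) := by
    exact_mod_cast PySem.Int.mod_natCast n 14
  simp only [mask_rook_attacks_alt, hr, hf]
  rw [show max 0 ((12:Int) - ((n/14 : Nat) : Int)) = ((12 - n/14 : Nat) : Int) from by omega,
      show max 0 ((12:Int) - ((n % 14 : Nat) : Int)) = ((12 - n % 14 : Nat) : Int) from by omega,
      show max 0 (((n/14 : Nat) : Int) - 1) = ((n/14 - 1 : Nat) : Int) from by omega,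
      show max 0 (((n % 14 : Nat) : Int) - 1) = ((n % 14 - 1 : Nat) : Int) from by omega]
  rw [column_natCast, column_natCast]
  have eup : ((n : Nat) : Int) + 14 = ((n + 14 : Nat) : Int) := by push_cast; ring
  have edown : ((n % 14 : Nat) : Int) + 14 = ((n % 14 + 14 : Nat) : Int) := by push_cast; ring
  have eright : ((n : Nat) : Int) + 1 = ((n + 1 : Nat) : Int) := by push_cast; ring
  have eleft : (14 : Int) * ((n/14 : Nat) : Int) + 1 = ((14*(n/14) + 1 : Nat) : Int) := by push_cast; ring
  have pr : pyShl 1 ((12 - n % 14 : Nat) : Int) = ((2^(12 - n % 14) : Nat) : Int) := by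
    rw [show (1:Int) = ((1:Nat) : Int) from rfl, pyShl_natCast]; norm_num
  have pl : pyShl 1 ((n % 14 - 1 : Nat) : Int) = ((2^(n % 14 - 1) : Nat) : Int) := by
    rw [show (1:Int) = ((1:Nat) : Int) from rfl, pyShl_natCast]; norm_num
  have mr : ((2^(12 - n % 14) : Nat) : Int) - 1 = ((2^(12 - n % 14) - 1 : Nat) : Int) := by
    have : 1 ≤ (2^(12 - n % 14) : Nat) := Nat.one_le_two_pow
    push_cast [this]; ring
  have ml : ((2^(n % 14 - 1) : Nat) : Int) - 1 = ((2^(n % 14 - 1) - 1 : Nat) : Int) := by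
    have : 1 ≤ (2^(n % 14 - 1) : Nat) := Nat.one_le_two_pow
    push_cast [this]; ring
  rw [eup, edown, eright, eleft, pr, pl, mr, ml, pyShl_natCast, pyShl_natCast,
      pyShl_natCast, pyShl_natCast]
  push_cast
  ring

-- each of A's directional sums equals B's closed-form run
theorem up_run (n : Nat) :
    (∑ k ∈ Finset.range (12 - n/14), 2^(n + 14*(k+1)))
    = (∑ k ∈ Finset.range (12 - n/14), 2^(14*k)) * 2^(n+14) := by
  rw [Finset.sum_mul]
  exact Finset.sum_congr rfl (fun k _ => by rw [← pow_add]; congr 1; ring)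

theorem down_run (n : Nat) :
    (∑ k ∈ Finset.range (n/14 - 1), 2^(14*(n/14 - 1 - k) + n % 14))
    = (∑ k ∈ Finset.range (n/14 - 1), 2^(14*k)) * 2^(n % 14 + 14) := by
  rw [Finset.sum_mul, ← Finset.sum_range_reflect (fun j => 2^(14*j) * 2^(n % 14 + 14)) (n/14 - 1)]
  exact Finset.sum_congr rfl (fun k hk => by
    have := Finset.mem_range.mp hk
    rw [← pow_add]; congr 1; omega)

theorem right_run (n : Nat) :
    (∑ k ∈ Finset.range (12 - n % 14), 2^(n + (k+1)))
    = (2^(12 - n % 14) - 1) * 2^(n+1) := by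
  rw [← pow_run, Finset.sum_mul]
  exact Finset.sum_congr rfl (fun k _ => by rw [← pow_add]; congr 1; ring)

theorem left_run (n : Nat) :
    (∑ k ∈ Finset.range (n % 14 - 1), 2^(14*(n/14) + (n % 14 - 1 - k)))
    = (2^(n % 14 - 1) - 1) * 2^(14*(n/14)+1) := by
  rw [← pow_run, Finset.sum_mul,
      ← Finset.sum_range_reflect (fun j => 2^j * 2^(14*(n/14)+1)) (n % 14 - 1)]
  exact Finset.sum_congr rfl (fun k hk => by
    have := Finset.mem_range.mp hk
    rw [← pow_add]; congr 1; omega)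

-- the two ports agree on every natural number
theorem ports_eq (n : Nat) : mask_rook_attacks (n : Int) = mask_rook_attacks_alt (n : Int) := by
  rw [A_eval, B_eval, up_run, down_run, right_run, left_run]

-- ===== VERDICT (by name: the statement is the Claim_ definition above) =====
theorem mask_rook_attacks_spec : Claim_equal_mask_rook_attacks := by
  intro square _ hpre
  unfold Spec_mask_rook_attacks
  have h : square = ((square.toNat : Nat) : Int) := by
    unfold Pre_mask_rook_attacks at hpre
    omega
  rw [h]
  exact ports_eq square.toNat
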